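-- pv_equiv track=rewrite | github.com/Wenglar/advent-of-code-2023-public | day_02/cubes_part2.py | get_least_possible
-- ===== SOURCE A (Python) =====
-- def get_least_possible(rgbs):
--     rs = []
--     gs = []
--     bs = []
--
--     for rgb in rgbs:
--         rs.append(rgb[0])
--         gs.append(rgb[1])
--         bs.append(rgb[2])
--
--     return [max(rs), max(gs), max(bs)]
-- ===== SOURCE B (Python) =====
-- def get_least_possible(rgbs):
--     # Divide-and-conquer: componentwise max of the two halves of the index range.
--     if not rgbs:
--         raise ValueError("max() arg is an empty sequence")
--
--     def solve(lo, hi):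
--         if hi - lo == 1:
--             rgb = rgbs[lo]
--             return [rgb[0], rgb[1], rgb[2]]
--         mid = (lo + hi) // 2
--         left = solve(lo, mid)
--         right = solve(mid, hi)
--         return [max(x, y) for x, y in zip(left, right)]
--
--     return solve(0, len(rgbs))
-- ===== Notes on version B (the rewrite author's own statement) =====
-- stated objective: alternative
-- what changed: Replaced A's three accumulated column lists plus three max() calls by a recursive divide-and-conquer over the index range that merges the componentwise maxima of the two halves with zip/max.
import Mathlib
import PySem

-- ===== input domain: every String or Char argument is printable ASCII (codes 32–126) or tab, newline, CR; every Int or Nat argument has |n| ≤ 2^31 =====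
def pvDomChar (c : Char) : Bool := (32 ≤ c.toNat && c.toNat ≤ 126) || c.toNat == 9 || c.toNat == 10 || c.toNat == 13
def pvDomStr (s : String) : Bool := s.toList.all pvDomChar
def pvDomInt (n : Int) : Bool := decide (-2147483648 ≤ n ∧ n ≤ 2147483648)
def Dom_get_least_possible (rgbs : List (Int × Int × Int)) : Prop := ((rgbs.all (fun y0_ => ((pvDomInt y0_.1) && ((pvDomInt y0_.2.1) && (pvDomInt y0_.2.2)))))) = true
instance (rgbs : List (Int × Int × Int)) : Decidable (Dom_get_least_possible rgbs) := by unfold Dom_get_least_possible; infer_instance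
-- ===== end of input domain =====

-- B replaces A's three accumulated column lists + three max() calls by a divide-and-conquer
-- over the index range merging the halves' componentwise maxima (alternative decomposition).

-- ===== PORT A =====
-- for rgb in rgbs: rs.append(rgb[0]); gs.append(rgb[1]); bs.append(rgb[2])
def get_least_possible (rgbs : List (Int × Int × Int)) : List Int :=
  let st := rgbs.foldl
    (fun (acc : List Int × List Int × List Int) rgb =>
      (acc.1 ++ [rgb.1], acc.2.1 ++ [rgb.2.1], acc.2.2 ++ [rgb.2.2]))
    ([], [], [])
  -- max(rs), max(gs), max(bs): none = ValueError on the empty list, excluded by Pre_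
  match PySem.List.max? st.1 (fun x => x), PySem.List.max? st.2.1 (fun x => x),
        PySem.List.max? st.2.2 (fun x => x) with
  | some r, some g, some b => [r, g, b]
  | _, _, _ => []

-- ===== PORT B =====
-- solve(lo, hi): componentwise max over rgbs[lo:hi]; fuel only makes the recursion
-- structurally total (each call is made with fuel ≥ hi - lo ≥ 1, so the 0 case is never hit
-- on admitted inputs).
def glpSolve (rgbs : List (Int × Int × Int)) : Nat → Nat → Nat → List Int
  | 0, _, _ => []
  | fuel + 1, lo, hi =>
    if hi - lo = 1 then
      let rgb := rgbs.getD lo (0, 0, 0)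
      [rgb.1, rgb.2.1, rgb.2.2]
    else
      let mid := (lo + hi) / 2
      let left := glpSolve rgbs fuel lo mid
      let right := glpSolve rgbs fuel mid hi
      List.zipWith (fun x y => max x y) left right

def get_least_possible_alt (rgbs : List (Int × Int × Int)) : List Int :=
  -- 'if not rgbs: raise ValueError' — the raise is outside Pre_
  if rgbs = [] then []
  else glpSolve rgbs rgbs.length 0 rgbs.length

-- ===== PRECONDITION & SPEC =====
-- Pre_ excludes the empty list, on which A raises ValueError (max of empty sequence).
def Pre_get_least_possible (rgbs : List (Int × Int × Int)) : Prop := rgbs ≠ []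
instance (rgbs : List (Int × Int × Int)) : Decidable (Pre_get_least_possible rgbs) := by unfold Pre_get_least_possible; infer_instance

def pvWitness_get_least_possible : (List (Int × Int × Int)) := [(1, 2, 3), (5, 0, 4)]

def Spec_get_least_possible (rgbs : List (Int × Int × Int)) (out : List Int) : Prop := out = get_least_possible_alt rgbs
instance (rgbs : List (Int × Int × Int)) (out : List Int) : Decidable (Spec_get_least_possible rgbs out) := by unfold Spec_get_least_possible; infer_instance

-- ===== CLAIM =====
def Claim_equal_get_least_possible : Prop := ∀ (rgbs : List (Int × Int × Int)), Dom_get_least_possible rgbs → Pre_get_least_possible rgbs → Spec_get_least_possible rgbs (get_least_possible rgbs)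

-- ===== LEMMAS AND PROOFS =====
-- componentwise max of a nonempty list, as A's three max() calls compute it
def glpCm : List (Int × Int × Int) → List Int
  | [] => []
  | p :: t =>
    [(t.map (·.1)).foldl max p.1,
     (t.map (·.2.1)).foldl max p.2.1,
     (t.map (·.2.2)).foldl max p.2.2]

theorem glp_fold_max_assoc (s : List Int) (A x : Int) :
    s.foldl max (max A x) = max A (s.foldl max x) := by
  induction s generalizing x with
  | nil => rfl
  | cons h t ih => simp only [List.foldl_cons, max_assoc, ih]

theorem glp_foldl_max_append (f : (Int × Int × Int) → Int) (p q : Int × Int × Int)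
    (t s : List (Int × Int × Int)) :
    ((t ++ q :: s).map f).foldl max (f p)
      = max ((t.map f).foldl max (f p)) ((s.map f).foldl max (f q)) := by
  rw [List.map_append, List.foldl_append, List.map_cons, List.foldl_cons,
    glp_fold_max_assoc]

theorem glpCm_append (a b : List (Int × Int × Int)) (ha : a ≠ []) (hb : b ≠ []) :
    glpCm (a ++ b) = List.zipWith (fun x y => max x y) (glpCm a) (glpCm b) := by
  match a, b with
  | p :: t, q :: s =>
    show glpCm (p :: (t ++ q :: s)) = _
    rw [glpCm, glpCm, glpCm,
      glp_foldl_max_append (fun x => x.1) p q t s,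
      glp_foldl_max_append (fun x => x.2.1) p q t s,
      glp_foldl_max_append (fun x => x.2.2) p q t s]
    rfl

theorem glpSolve_eq (rgbs : List (Int × Int × Int)) :
    ∀ (fuel lo hi : Nat), lo < hi → hi - lo ≤ fuel → hi ≤ rgbs.length →
      glpSolve rgbs fuel lo hi = glpCm ((rgbs.drop lo).take (hi - lo)) := by
  intro fuel
  induction fuel with
  | zero => intro lo hi h1 h2 _; omega
  | succ fuel ih =>
    intro lo hi h1 h2 hlen
    by_cases hone : hi - lo = 1
    · have hlo : lo < rgbs.length := by omega
      rw [glpSolve, if_pos hone, hone, List.drop_eq_getElem_cons hlo, List.take_succ_cons,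
        List.take_zero, List.getD_eq_getElem rgbs (0, 0, 0) hlo]
      rfl
    · have h2lt : lo + 2 ≤ hi := by omega
      have hmid1 : lo < (lo + hi) / 2 := by omega
      have hmid2 : (lo + hi) / 2 < hi := by omega
      rw [glpSolve, if_neg hone]
      simp only
      rw [ih lo ((lo + hi) / 2) hmid1 (by omega) (by omega),
          ih ((lo + hi) / 2) hi hmid2 (by omega) hlen]
      have hsplit : (rgbs.drop lo).take (hi - lo)
          = (rgbs.drop lo).take ((lo + hi) / 2 - lo)
            ++ (rgbs.drop ((lo + hi) / 2)).take (hi - (lo + hi) / 2) := by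
        have hlen' : hi - lo = ((lo + hi) / 2 - lo) + (hi - (lo + hi) / 2) := by omega
        have hd : (rgbs.drop lo).drop ((lo + hi) / 2 - lo) = rgbs.drop ((lo + hi) / 2) := by
          rw [List.drop_drop]
          congr 1
          omega
        rw [hlen', List.take_add, hd]
      rw [hsplit, glpCm_append]
      · apply List.ne_nil_of_length_pos
        simp only [List.length_take, List.length_drop]
        omega
      · apply List.ne_nil_of_length_pos
        simp only [List.length_take, List.length_drop]
        omega

theorem glp_foldl_eq (l : List (Int × Int × Int)) (a b c : List Int) :
    l.foldl
      (fun (acc : List Int × List Int × List Int) rgb =>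
        (acc.1 ++ [rgb.1], acc.2.1 ++ [rgb.2.1], acc.2.2 ++ [rgb.2.2]))
      (a, b, c)
    = (a ++ l.map (·.1), b ++ l.map (·.2.1), c ++ l.map (·.2.2)) := by
  induction l generalizing a b c with
  | nil => simp
  | cons h t ih => simp [ih]

-- ===== VERDICT =====
theorem get_least_possible_spec : Claim_equal_get_least_possible := by
  intro rgbs _ hpre
  unfold Spec_get_least_possible
  match rgbs with
  | [] => exact absurd rfl hpre
  | (r, g, b) :: t =>
    rw [get_least_possible_alt, if_neg (by simp),
      glpSolve_eq _ _ 0 _ (by simp) (by omega) (by omega)]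
    simp only [List.drop_zero, Nat.sub_zero, List.take_of_length_le (le_refl _)]
    simp only [get_least_possible, glp_foldl_eq, List.map_cons, List.nil_append,
      PySem.List.max?_id_cons, glpCm, List.foldl_map]
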